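-- pv_equiv track=rewrite | github.com/dcparry/pythonProject | Heatmap_project_Dianne_Parry.py | entire_suburbs
-- ===== SOURCE A (Python) =====
-- def entire_suburbs(dogs):
--     """ Takes dictionary of alive dogs and returns new dictionary of suburb as
--         key and number of dogs not desexed in that suburb as the value.
--         :param dogs: dictionary of alive dogs and their attributes.
--         :return: dictionary of suburb and count as key/value pair.
--     """
--     entire_suburbs_dict = {}
--     for suburb, desexed, classification, microchip in dogs.values():
--         if suburb not in entire_suburbs_dict:
--             entire_suburbs_dict[suburb] = 0
--         if desexed == "N":
--             entire_suburbs_dict[suburb] += 1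
--     entire_dict = dict(sorted(entire_suburbs_dict.items()))
--     return entire_dict
-- ===== SOURCE B (Python) =====
-- def entire_suburbs(dogs):
--     """Sort-then-group-scan: sort (suburb, indicator) pairs by suburb, then one
--     linear scan summing each consecutive run; no membership guards, no counting dict."""
--     pairs = sorted(((suburb, 1 if desexed == "N" else 0)
--                     for suburb, desexed, classification, microchip in dogs.values()),
--                    key=lambda p: p[0])
--     result = {}
--     i = 0
--     n = len(pairs)
--     while i < n:
--         s = pairs[i][0]
--         total = 0
--         while i < n and pairs[i][0] == s:
--             total += pairs[i][1]
--             i += 1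
--         result[s] = total
--     return result
-- ===== Notes on version B (the rewrite author's own statement) =====
-- stated objective: alternative
-- what changed: Replaces A's hash-dict counting loop (membership guard + in-place increment, then sorting the items) by a sort-then-scan algorithm: build (suburb, indicator) pairs, sort them by suburb, and sum each consecutive run in one linear group scan with no dictionary lookups at all.
import Mathlib
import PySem

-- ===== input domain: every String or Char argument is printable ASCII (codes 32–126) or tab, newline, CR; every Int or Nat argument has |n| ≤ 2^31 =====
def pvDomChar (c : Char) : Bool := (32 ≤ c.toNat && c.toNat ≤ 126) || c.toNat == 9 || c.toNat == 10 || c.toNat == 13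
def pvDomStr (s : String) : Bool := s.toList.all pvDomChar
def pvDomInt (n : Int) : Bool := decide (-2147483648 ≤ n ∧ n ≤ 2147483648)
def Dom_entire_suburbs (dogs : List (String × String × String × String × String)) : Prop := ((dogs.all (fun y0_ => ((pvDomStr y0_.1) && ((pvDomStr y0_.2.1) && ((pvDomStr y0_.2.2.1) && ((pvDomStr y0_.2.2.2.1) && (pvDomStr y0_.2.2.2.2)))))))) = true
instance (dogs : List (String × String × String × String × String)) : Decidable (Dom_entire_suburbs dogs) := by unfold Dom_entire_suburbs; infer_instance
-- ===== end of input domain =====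

-- B replaces A's hash-dict counting loop by sort-then-scan: sort (suburb, indicator) pairs by suburb and sum each consecutive run in one linear group scan; same return value, proved for all inputs.

-- ===== PORT A =====
-- A's loop body: guard-insert 0 for an unseen suburb, then += 1 when desexed == "N"
def entire_suburbs_step (d : PySem.Dict String Int) (v : String × String × String × String) : PySem.Dict String Int :=
  let d := if d.contains v.1 then d else d.insert v.1 (0 : Int)
  if v.2.1 == "N" then d.insert v.1 (d.getD v.1 0 + 1) else d

-- A: one loop over dogs.values() maintaining the counting dict, then sorted(items)
def entire_suburbs (dogs : List (String × String × String × String × String)) : List (String × Int) :=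
  let vals := (PySem.Dict.ofList dogs).values
  let d := vals.foldl entire_suburbs_step PySem.Dict.empty
  PySem.List.sorted2 d.items (fun p => p.1) (fun p => p.2) false

-- ===== PORT B =====
-- B's group scan: the nested while-loop consuming one run of equal suburbs per outer step
def esGroup : List (String × Int) → List (String × Int)
  | [] => []
  | p :: rest =>
      (p.1, p.2 + ((rest.takeWhile (fun q => q.1 == p.1)).map Prod.snd).sum)
        :: esGroup (rest.dropWhile (fun q => q.1 == p.1))
  termination_by l => l.length
  decreasing_by
    simp only [List.length_cons]
    exact Nat.lt_succ_of_le (List.dropWhile_sublist _).length_le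

-- B: build (suburb, indicator) pairs, sort them by suburb, group-scan the runs
def entire_suburbs_alt (dogs : List (String × String × String × String × String)) : List (String × Int) :=
  let vals := (PySem.Dict.ofList dogs).values
  let pairs := PySem.List.sorted (vals.map (fun v => (v.1, if v.2.1 == "N" then (1 : Int) else 0))) (fun p => p.1) false
  esGroup pairs

-- ===== PRECONDITION & SPEC =====
def Spec_entire_suburbs (dogs : List (String × String × String × String × String)) (out : List (String × Int)) : Prop := out = entire_suburbs_alt dogs
instance (dogs : List (String × String × String × String × String)) (out : List (String × Int)) : Decidable (Spec_entire_suburbs dogs out) := by unfold Spec_entire_suburbs; infer_instance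

-- ===== CLAIM (what is proved, stated in full; the proofs are below) =====
def Claim_equal_entire_suburbs : Prop := ∀ (dogs : List (String × String × String × String × String)), Dom_entire_suburbs dogs → Spec_entire_suburbs dogs (entire_suburbs dogs)

-- ===== LEMMAS AND PROOFS =====

-- the non-desexed count of suburb s over the value list l
def pvCnt (l : List (String × String × String × String)) (s : String) : Int :=
  (((l.filter (fun v => v.2.1 == "N")).map (fun v => v.1)).count s : Int)

-- sum of the indicator components of the pairs with key s
def pvSum (P : List (String × Int)) (s : String) : Int :=
  ((P.filter (fun q => q.1 == s)).map Prod.snd).sum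

theorem pvCnt_append (l : List (String × String × String × String)) (v : String × String × String × String) (s : String) :
    pvCnt (l ++ [v]) s = pvCnt l s + (if v.2.1 == "N" then (if v.1 = s then 1 else 0) else 0) := by
  simp only [pvCnt, List.filter_append, List.map_append, List.count_append]
  by_cases hN : v.2.1 == "N"
  · by_cases hs : v.1 = s <;> simp [hN, hs, List.count_nil]
  · simp [hN]

theorem pvCnt_of_not_mem (l : List (String × String × String × String)) (s : String)
    (h : s ∉ l.map (fun v => v.1)) : pvCnt l s = 0 := by
  simp only [pvCnt]
  norm_cast
  rw [List.count_eq_zero]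
  intro hmem
  apply h
  rcases List.mem_map.1 hmem with ⟨v, hv, rfl⟩
  exact List.mem_map.2 ⟨v, List.mem_of_mem_filter hv, rfl⟩

theorem pvSet_append (xs : List String) (y : String) :
    PySem.Set.ofList (xs ++ [y]) = PySem.Set.add (PySem.Set.ofList xs) y := by
  simp [PySem.Set.ofList_eq_foldl, List.foldl_append]

-- invariant: A's dict after the loop lists each suburb (first-occurrence order) with its non-desexed count
theorem pv_items_fold (l : List (String × String × String × String)) :
    (l.foldl entire_suburbs_step PySem.Dict.empty).items
      = (PySem.Set.ofList (l.map (fun v => v.1))).map (fun s => (s, pvCnt l s)) := by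
  induction l using List.reverseRecOn with
  | nil => rfl
  | append_singleton l v ih =>
    rw [List.foldl_append, List.foldl_cons, List.foldl_nil]
    set d := l.foldl entire_suburbs_step PySem.Dict.empty with hd
    have hkeys : d.keys = PySem.Set.ofList (l.map (fun v => v.1)) := by
      show d.items.map Prod.fst = _
      rw [ih, List.map_map]
      exact List.map_id _
    have hnod : d.keys.Nodup := by rw [hkeys]; exact PySem.Set.nodup_ofList _
    have hmapeq : (l ++ [v]).map (fun v => v.1) = l.map (fun v => v.1) ++ [v.1] := by simp
    rw [hmapeq, pvSet_append]
    by_cases hv : v.1 ∈ l.map (fun v => v.1)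
    · -- suburb already present
      have hcont : d.contains v.1 = true := by
        rw [PySem.Dict.contains_iff_mem_keys _ _, hkeys]
        exact (PySem.Set.mem_ofList _ _).2 hv
      have hvset : v.1 ∈ PySem.Set.ofList (l.map (fun v => v.1)) := (PySem.Set.mem_ofList _ _).2 hv
      rw [PySem.Set.add_of_mem hvset]
      have hmem : (v.1, pvCnt l v.1) ∈ d.items := by
        rw [ih]; exact List.mem_map_of_mem hvset
      have hgetD : d.getD v.1 0 = pvCnt l v.1 := PySem.Dict.getD_of_mem_items d hmem hnod 0
      by_cases hN : v.2.1 == "N"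
      · simp only [entire_suburbs_step, hcont, if_true, hN, hgetD]
        rw [PySem.Dict.items_insert_of_contains d _ hcont, ih, List.map_map]
        apply List.map_congr_left
        intro s hs
        by_cases hsv : s = v.1
        · subst hsv
          simp [pvCnt_append, hN]
        · have : (s == v.1) = false := by simp [hsv]
          simp [Function.comp, this, pvCnt_append, hN, Ne.symm hsv]
      · simp only [entire_suburbs_step, hcont, if_true, hN, if_false, Bool.false_eq_true]
        rw [ih]
        apply List.map_congr_left
        intro s hs
        simp [pvCnt_append, hN]
    · -- new suburb
      have hcont : d.contains v.1 = false := by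
        rw [Bool.eq_false_iff]
        intro h
        have := (PySem.Dict.contains_iff_mem_keys d v.1).1 h
        rw [hkeys] at this
        exact hv ((PySem.Set.mem_ofList _ _).1 this)
      have hvset : v.1 ∉ PySem.Set.ofList (l.map (fun v => v.1)) := fun h => hv ((PySem.Set.mem_ofList _ _).1 h)
      rw [PySem.Set.add_of_not_mem hvset]
      have hcnt0 : pvCnt l v.1 = 0 := pvCnt_of_not_mem l v.1 hv
      by_cases hN : v.2.1 == "N"
      · simp only [entire_suburbs_step, hcont, Bool.false_eq_true, if_false, hN, if_true]
        rw [PySem.Dict.getD_insert_self, PySem.Dict.items_insert_of_contains _ _ (PySem.Dict.contains_insert_self d v.1 0)]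
        rw [PySem.Dict.items_insert_of_not_contains d _ hcont, ih]
        rw [List.map_append, List.map_append, List.map_map]
        congr 1
        · apply List.map_congr_left
          intro s hs
          have hsv : s ≠ v.1 := fun h => hvset (h ▸ hs)
          have : (s == v.1) = false := by simp [hsv]
          simp [Function.comp, this, pvCnt_append, hN, Ne.symm hsv]
        · simp [pvCnt_append, hN, hcnt0]
      · simp only [entire_suburbs_step, hcont, Bool.false_eq_true, if_false, hN]
        rw [PySem.Dict.items_insert_of_not_contains d _ hcont, ih]
        rw [List.map_append]
        congr 1
        · apply List.map_congr_left
          intro s hs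
          simp [pvCnt_append, hN]
        · simp [pvCnt_append, hN, hcnt0]

theorem pv_insertBy_congr {α : Type} (b1 b2 : α → α → Bool) (x : α) (acc : List α)
    (h : ∀ y ∈ acc, b1 x y = b2 x y) :
    PySem.List.insertBy b1 x acc = PySem.List.insertBy b2 x acc := by
  induction acc with
  | nil => rfl
  | cons y ys ih =>
    simp only [PySem.List.insertBy]
    rw [h y (by simp)]
    by_cases hb : b2 x y = true
    · simp [hb]
    · simp [hb, ih (fun z hz => h z (by simp [hz]))]

theorem pv_foldl_insertBy_congr {α : Type} (b1 b2 : α → α → Bool) (l acc : List α)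
    (h : ∀ x y, (x ∈ l ∨ x ∈ acc) → (y ∈ l ∨ y ∈ acc) → b1 x y = b2 x y) :
    l.foldl (fun acc x => PySem.List.insertBy b1 x acc) acc
      = l.foldl (fun acc x => PySem.List.insertBy b2 x acc) acc := by
  induction l generalizing acc with
  | nil => rfl
  | cons x xs ih =>
    simp only [List.foldl_cons]
    rw [pv_insertBy_congr b1 b2 x acc (fun y hy => h x y (by simp) (by simp [hy]))]
    exact ih (PySem.List.insertBy b2 x acc) (fun a b ha hb => by
      apply h a b
      · rcases ha with ha | ha
        · exact Or.inl (by simp [ha])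
        · rcases (PySem.List.insertBy_mem_iff b2 x a acc).1 ha with h' | h'
          · exact Or.inl (by simp [h'])
          · exact Or.inr h'
      · rcases hb with hb | hb
        · exact Or.inl (by simp [hb])
        · rcases (PySem.List.insertBy_mem_iff b2 x b acc).1 hb with h' | h'
          · exact Or.inl (by simp [h'])
          · exact Or.inr h')

-- A equals the canonical form: the sorted suburb set mapped to its non-desexed counts
theorem pv_A_canon (dogs : List (String × String × String × String × String)) :
    entire_suburbs dogs
      = (PySem.List.sorted (PySem.Set.ofList ((PySem.Dict.ofList dogs).values.map (fun v => v.1))) (fun s => s) false).map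
          (fun s => (s, pvCnt (PySem.Dict.ofList dogs).values s)) := by
  set vals := (PySem.Dict.ofList dogs).values with hvals
  show PySem.List.sorted2 ((vals.foldl entire_suburbs_step PySem.Dict.empty).items)
        (fun p => p.1) (fun p => p.2) false
      = (PySem.List.sorted (PySem.Set.ofList (vals.map (fun v => v.1))) (fun s => s) false).map
          (fun s => (s, pvCnt vals s))
  set S : PySem.Set String := PySem.Set.ofList (vals.map (fun v => v.1)) with hS
  set f : String → String × Int := fun s => (s, pvCnt vals s) with hf
  rw [pv_items_fold vals]
  have hbij : ∀ p ∈ S.map f, ∀ q ∈ S.map f,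
      (decide (p.1 < q.1) || (!decide (q.1 < p.1) && decide (p.2 < q.2)))
        = decide (p.1 < q.1) := by
    intro p hp q hq
    rcases List.mem_map.1 hp with ⟨a, ha, rfl⟩
    rcases List.mem_map.1 hq with ⟨b, hb, rfl⟩
    by_cases hab : a = b
    · subst hab; simp [hf]
    · simp only [hf]
      rcases lt_trichotomy a b with h | h | h
      · simp [h]
      · exact absurd h hab
      · simp [h, not_lt_of_gt h]
  have hs2 : PySem.List.sorted2 (S.map f) (fun p => p.1) (fun p => p.2) false
      = PySem.List.sorted (S.map f) (fun p => p.1) false := by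
    simp only [PySem.List.sorted2, PySem.List.sorted, if_neg (by simp : ¬ (false = true))]
    exact pv_foldl_insertBy_congr _ _ (S.map f) []
      (fun x y hx hy => hbij x (by rcases hx with h | h; exact h; simp at h)
                             y (by rcases hy with h | h; exact h; simp at h))
  rw [hs2]
  apply PySem.List.sorted_eq_of_perm_of_pairwise_lt
  · exact (PySem.List.sorted_perm S (fun s => s) false).map f
  · have hpw : (PySem.List.sorted S (fun s => s) false).Pairwise (· < ·) := by
      rw [hS]
      exact PySem.List.sorted_ofList_pairwise_lt (vals.map (fun v => v.1))
    exact List.Pairwise.map f (fun a b h => h) hpw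

-- ===== B-side lemmas =====

theorem pv_foldl_add_prefix (a : List String) (xs : List String) :
    ∀ l : List String, (∀ x ∈ xs, x ∉ a) →
    xs.foldl PySem.Set.add (a ++ l) = a ++ xs.foldl PySem.Set.add l := by
  induction xs with
  | nil => intro l _; rfl
  | cons x xs ih =>
    intro l h
    have hxa : x ∉ a := h x (by simp)
    have hstep : PySem.Set.add (a ++ l) x = a ++ PySem.Set.add l x := by
      by_cases hxl : x ∈ l
      · simp [PySem.Set.add, PySem.Set.contains, hxl]
      · simp [PySem.Set.add, PySem.Set.contains, hxl, hxa]
    rw [List.foldl_cons, hstep, List.foldl_cons]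
    exact ih (PySem.Set.add l x) (fun y hy => h y (by simp [hy]))

theorem pv_foldl_add_const (xs : List String) (s : String) (h : ∀ x ∈ xs, x = s) :
    xs.foldl PySem.Set.add [s] = [s] := by
  induction xs with
  | nil => rfl
  | cons x xs ih =>
    have hx : x = s := h x (by simp)
    subst hx
    rw [List.foldl_cons]
    have : PySem.Set.add [x] x = [x] := by simp [PySem.Set.add, PySem.Set.contains]
    rw [this]
    exact ih (fun y hy => h y (by simp [hy]))

theorem pv_ofList_run (s : String) (ys zs : List String)
    (hy : ∀ y ∈ ys, y = s) (hz : s ∉ zs) :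
    PySem.Set.ofList (s :: (ys ++ zs)) = s :: PySem.Set.ofList zs := by
  rw [PySem.Set.ofList_eq_foldl, List.foldl_cons]
  have h0 : PySem.Set.add ([] : List String) s = [s] := rfl
  rw [h0, List.foldl_append, pv_foldl_add_const ys s hy]
  have := pv_foldl_add_prefix [s] zs [] (fun x hx => by
    simp only [List.mem_singleton]
    intro hcontra; exact hz (hcontra ▸ hx))
  simpa [PySem.Set.ofList_eq_foldl] using this

theorem pv_ofList_sublist_aux (xs : List String) :
    ∀ acc : List String, List.Sublist (xs.foldl PySem.Set.add acc) (acc ++ xs) := by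
  induction xs with
  | nil => intro acc; simp
  | cons x xs ih =>
    intro acc
    rw [List.foldl_cons]
    have h1 : List.Sublist (xs.foldl PySem.Set.add (PySem.Set.add acc x)) ((PySem.Set.add acc x) ++ xs) := ih _
    have h2 : List.Sublist (PySem.Set.add acc x) (acc ++ [x]) := by
      simp only [PySem.Set.add, PySem.Set.contains]
      split
      · exact List.sublist_append_left acc [x]
      · exact List.Sublist.refl _
    have h3 : List.Sublist ((PySem.Set.add acc x) ++ xs) ((acc ++ [x]) ++ xs) := h2.append_right xs
    have h4 : (acc ++ [x]) ++ xs = acc ++ x :: xs := by simp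
    exact h4 ▸ (h1.trans h3)

theorem pv_ofList_sublist (xs : List String) : List.Sublist (PySem.Set.ofList xs) xs := by
  have := pv_ofList_sublist_aux xs []
  simpa [PySem.Set.ofList_eq_foldl] using this

-- heads of dropWhile fail the predicate
theorem pv_dropWhile_head_not {α : Type} (f : α → Bool) :
    ∀ (l : List α) (r : α) (t : List α), l.dropWhile f = r :: t → f r = false := by
  intro l
  induction l with
  | nil => intro r t h; simp [List.dropWhile] at h
  | cons x xs ih =>
    intro r t h
    by_cases hx : f x = true
    · rw [List.dropWhile_cons_of_pos hx] at h; exact ih r t h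
    · rw [List.dropWhile_cons_of_neg hx] at h
      cases h
      simpa using hx

-- group-scan characterisation on a key-nondecreasing list
theorem pv_esGroup_spec : ∀ P : List (String × Int), P.Pairwise (fun a b => a.1 ≤ b.1) →
    esGroup P = (PySem.Set.ofList (P.map Prod.fst)).map (fun s => (s, pvSum P s)) := by
  intro P
  induction P using esGroup.induct with
  | case1 => intro _; simp [esGroup]
  | case2 p rest ih =>
    intro hpw
    have hsplit : rest = rest.takeWhile (fun q => q.1 == p.1) ++ rest.dropWhile (fun q => q.1 == p.1) :=
      (List.takeWhile_append_dropWhile).symm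
    have hrun : ∀ q ∈ rest.takeWhile (fun q => q.1 == p.1), q.1 = p.1 := by
      intro q hq
      simpa using List.mem_takeWhile_imp hq
    have hle : ∀ q ∈ rest, p.1 ≤ q.1 := fun q hq => List.rel_of_pairwise_cons hpw hq
    have hpw_rest : rest.Pairwise (fun a b => a.1 ≤ b.1) := hpw.of_cons
    have hpw' : (rest.dropWhile (fun q => q.1 == p.1)).Pairwise (fun a b => a.1 ≤ b.1) :=
      hpw_rest.sublist (List.dropWhile_sublist _)
    have hlt : ∀ q ∈ rest.dropWhile (fun q => q.1 == p.1), p.1 < q.1 := by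
      cases hc : rest.dropWhile (fun q => q.1 == p.1) with
      | nil => intro q hq; simp at hq
      | cons r t =>
        have hrne : r.1 ≠ p.1 := by
          have := pv_dropWhile_head_not (fun q => q.1 == p.1) rest r t hc
          simpa using this
        have hrmem : r ∈ rest := (List.dropWhile_sublist _).mem (by rw [hc]; simp)
        have hpr : p.1 < r.1 := lt_of_le_of_ne (hle r hrmem) (Ne.symm hrne)
        intro q hq
        rcases List.mem_cons.1 hq with rfl | hqt
        · exact hpr
        · have hpwc : (r :: t).Pairwise (fun a b => a.1 ≤ b.1) := hc ▸ hpw'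
          exact lt_of_lt_of_le hpr (List.rel_of_pairwise_cons hpwc hqt)

    have hnotmem : p.1 ∉ (rest.dropWhile (fun q => q.1 == p.1)).map Prod.fst := by
      intro h
      rcases List.mem_map.1 h with ⟨q, hq, hq1⟩
      exact absurd (hq1 ▸ hlt q hq) (lt_irrefl _)
    have hmapfst : (p :: rest).map Prod.fst
        = p.1 :: ((rest.takeWhile (fun q => q.1 == p.1)).map Prod.fst
            ++ (rest.dropWhile (fun q => q.1 == p.1)).map Prod.fst) := by
      rw [List.map_cons]
      congr 1
      conv_lhs => rw [hsplit]
      rw [List.map_append]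
    have hset : PySem.Set.ofList ((p :: rest).map Prod.fst)
        = p.1 :: PySem.Set.ofList ((rest.dropWhile (fun q => q.1 == p.1)).map Prod.fst) := by
      rw [hmapfst]
      exact pv_ofList_run p.1 _ _
        (fun y hy => by rcases List.mem_map.1 hy with ⟨q, hq, rfl⟩; exact hrun q hq)
        hnotmem
    have hfilter_run : (rest.takeWhile (fun q => q.1 == p.1)).filter (fun q => q.1 == p.1)
        = rest.takeWhile (fun q => q.1 == p.1) := by
      apply List.filter_eq_self.2
      intro q hq; simpa using hrun q hq
    have hfilter_rest' : (rest.dropWhile (fun q => q.1 == p.1)).filter (fun q => q.1 == p.1) = [] := by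
      apply List.filter_eq_nil_iff.2
      intro q hq
      simpa using ne_of_gt (hlt q hq)
    have hheadsum : pvSum (p :: rest) p.1
        = p.2 + ((rest.takeWhile (fun q => q.1 == p.1)).map Prod.snd).sum := by
      simp only [pvSum]
      rw [List.filter_cons]
      conv_lhs => rw [hsplit]
      rw [List.filter_append, hfilter_run, hfilter_rest', List.append_nil]
      simp
    have htailsum : ∀ s ∈ (rest.dropWhile (fun q => q.1 == p.1)).map Prod.fst,
        pvSum (p :: rest) s = pvSum (rest.dropWhile (fun q => q.1 == p.1)) s := by
      intro s hs
      have hsne : s ≠ p.1 := fun h => hnotmem (h ▸ hs)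
      have hp : ((p.1 : String) == s) = false := by simpa using (Ne.symm hsne)
      have hrunf : (rest.takeWhile (fun q => q.1 == p.1)).filter (fun q => q.1 == s) = [] := by
        apply List.filter_eq_nil_iff.2
        intro q hq
        have hq1 := hrun q hq
        simpa [hq1] using (Ne.symm hsne)
      simp only [pvSum]
      rw [List.filter_cons, hp]
      simp only [Bool.false_eq_true, if_false]
      conv_lhs => rw [hsplit]
      rw [List.filter_append, hrunf, List.nil_append]
    rw [esGroup, hset, List.map_cons]
    congr 1
    · rw [hheadsum]
    · rw [ih hpw']
      apply List.map_congr_left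
      intro s hs
      have hs' : s ∈ (rest.dropWhile (fun q => q.1 == p.1)).map Prod.fst :=
        (PySem.Set.mem_ofList _ _).1 hs
      rw [htailsum s hs']

theorem pv_pvSum_perm (P Q : List (String × Int)) (h : P.Perm Q) (s : String) :
    pvSum P s = pvSum Q s := by
  exact List.Perm.sum_eq ((h.filter _).map _)

theorem pv_pvSum_pairs (vals : List (String × String × String × String)) (s : String) :
    pvSum (vals.map (fun v => (v.1, if v.2.1 == "N" then (1 : Int) else 0))) s = pvCnt vals s := by
  induction vals with
  | nil => rfl
  | cons v vs ih =>
    simp only [List.map_cons, pvSum, pvCnt, List.filter_cons] at *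
    by_cases hN : v.2.1 == "N" <;> by_cases hs : v.1 == s <;>
      simp_all [List.count_cons] <;> push_cast <;> ring

-- B equals the canonical form
theorem pv_B_canon (dogs : List (String × String × String × String × String)) :
    entire_suburbs_alt dogs
      = (PySem.List.sorted (PySem.Set.ofList ((PySem.Dict.ofList dogs).values.map (fun v => v.1))) (fun s => s) false).map
          (fun s => (s, pvCnt (PySem.Dict.ofList dogs).values s)) := by
  set vals := (PySem.Dict.ofList dogs).values with hvals
  set pairs := vals.map (fun v => (v.1, if v.2.1 == "N" then (1 : Int) else 0)) with hpairs
  set P := PySem.List.sorted pairs (fun p => p.1) false with hP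
  have hperm : P.Perm pairs := PySem.List.sorted_perm pairs (fun p => p.1) false
  have hpw : P.Pairwise (fun a b => a.1 ≤ b.1) := PySem.List.sorted_pairwise pairs (fun p => p.1)
  set S : PySem.Set String := PySem.Set.ofList (vals.map (fun v => v.1)) with hS
  set K : List String := PySem.Set.ofList (P.map Prod.fst) with hK
  have hB : entire_suburbs_alt dogs = K.map (fun s => (s, pvSum P s)) := by
    show esGroup P = _
    exact pv_esGroup_spec P hpw
  have hsum : ∀ s, pvSum P s = pvCnt vals s := by
    intro s
    rw [pv_pvSum_perm P pairs hperm s, hpairs, pv_pvSum_pairs]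
  have hmemP : ∀ x, x ∈ P.map Prod.fst ↔ x ∈ vals.map (fun v => v.1) := by
    intro x
    constructor
    · intro hx
      rcases List.mem_map.1 hx with ⟨q, hq, rfl⟩
      have : q ∈ pairs := hperm.mem_iff.1 hq
      rcases List.mem_map.1 this with ⟨v, hv, rfl⟩
      exact List.mem_map.2 ⟨v, hv, rfl⟩
    · intro hx
      rcases List.mem_map.1 hx with ⟨v, hv, rfl⟩
      have : (v.1, if v.2.1 == "N" then (1 : Int) else 0) ∈ pairs := List.mem_map.2 ⟨v, hv, rfl⟩
      exact List.mem_map.2 ⟨_, hperm.mem_iff.2 this, rfl⟩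
  have hKperm : K.Perm S := by
    rw [List.perm_ext_iff_of_nodup (PySem.Set.nodup_ofList _) (PySem.Set.nodup_ofList _)]
    intro a
    rw [PySem.Set.mem_ofList, PySem.Set.mem_ofList]
    exact hmemP a
  have hKlt : K.Pairwise (· < ·) := by
    have hsub : List.Sublist K (P.map Prod.fst) := pv_ofList_sublist _
    have hle : (P.map Prod.fst).Pairwise ((· ≤ ·) : String → String → Prop) := by
      rw [List.pairwise_map]
      exact hpw
    have hKle : K.Pairwise ((· ≤ ·) : String → String → Prop) := hle.sublist hsub
    have hKne : K.Pairwise (· ≠ ·) := PySem.Set.nodup_ofList _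
    exact (hKle.and hKne).imp (fun h => lt_of_le_of_ne h.1 h.2)
  have hsorted : PySem.List.sorted S (fun s => s) false = K :=
    PySem.List.sorted_eq_of_perm_of_pairwise_lt S K (fun s => s) hKperm hKlt
  rw [hB, hsorted]
  apply List.map_congr_left
  intro s _
  rw [hsum s]

-- ===== VERDICT (by name: the statement is the Claim_ definition above) =====
theorem entire_suburbs_spec : Claim_equal_entire_suburbs := by
  intro dogs _
  show entire_suburbs dogs = entire_suburbs_alt dogs
  rw [pv_A_canon, pv_B_canon]
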